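-- pv_equiv track=rewrite | github.com/Alvaropz/Python_problems_BinarySearch | 1. Easy/swap_consecutive_pair_of_even_numbers/swap_consecutive_pair_of_even_numbers.py | swap_consecutive_pair_of_even_numbers
-- ===== SOURCE A (Python) =====
-- def swap_consecutive_pair_of_even_numbers(nums):
--     i = 0
--     j = len(nums)-1
--     while i < j:
--         if nums[i] % 2 == 0:
--             second_i = i+1
--             while second_i <= j:
--                 if nums[second_i] % 2 == 0:
--                     nums[i], nums[second_i] = nums[second_i], nums[i]
--                     i = second_i
--                     break
--                 second_i += 1
--         i += 1
--     return nums
-- ===== SOURCE B (Python) =====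
-- def swap_consecutive_pair_of_even_numbers(nums):
--     evens = [k for k, v in enumerate(nums) if v % 2 == 0]
--     for t in range(0, len(evens) - 1, 2):
--         a, b = evens[t], evens[t + 1]
--         nums[a], nums[b] = nums[b], nums[a]
--     return nums
-- ===== Notes on version B (the rewrite author's own statement) =====
-- stated objective: simpler
-- what changed: Replaces the intertwined scan-and-jump two-pointer while loop by two plain passes: first collect the indices of even elements, then swap them pairwise (evens[0]<->evens[1], evens[2]<->evens[3], ...), leaving a lone trailing even untouched.
import Mathlib
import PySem

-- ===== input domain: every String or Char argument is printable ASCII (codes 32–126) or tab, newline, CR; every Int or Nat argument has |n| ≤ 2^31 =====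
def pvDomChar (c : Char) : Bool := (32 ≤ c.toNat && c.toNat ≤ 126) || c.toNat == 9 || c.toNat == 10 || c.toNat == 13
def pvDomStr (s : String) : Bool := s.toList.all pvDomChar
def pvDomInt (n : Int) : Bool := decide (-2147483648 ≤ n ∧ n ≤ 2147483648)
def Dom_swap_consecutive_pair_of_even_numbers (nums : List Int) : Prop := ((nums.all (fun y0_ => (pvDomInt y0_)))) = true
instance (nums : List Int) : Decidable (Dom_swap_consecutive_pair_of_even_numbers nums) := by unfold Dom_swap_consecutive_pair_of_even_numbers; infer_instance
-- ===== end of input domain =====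

-- B replaces A's intertwined scan-and-jump while loop by two passes (collect even indices, then swap them
-- pairwise); objective: simpler.  Both Pythons mutate `nums` in place and return it; the theorems here are
-- about the RETURN value (which is that same list).

-- ===== PORT A =====
-- inner while loop: scan second_i upward for the next even element; the fuel is exactly the
-- number of remaining loop iterations (second_i .. j), so the recursion is the Python loop step for step
def pvInnerGo (xs : List Int) (fuel : Nat) (second_i : Int) : Option Int :=
  match fuel with
  | 0 => none
  | n + 1 =>
    if PySem.Int.mod (PySem.List.pyGetD xs second_i 0) 2 = 0 then some second_i
    else pvInnerGo xs n (second_i + 1)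

def pvInnerA (xs : List Int) (second_i j : Int) : Option Int :=
  pvInnerGo xs ((j + 1 - second_i).toNat) second_i

-- outer while loop; on a swap, i jumps to second_i and then i += 1.  i strictly increases while
-- i < j, so a fuel of (j - i).toNat + 1 upper-bounds the iterations; the i < j guard is kept literally
def pvOuterGo (xs : List Int) (fuel : Nat) (i j : Int) : List Int :=
  match fuel with
  | 0 => xs
  | n + 1 =>
    if i < j then
      if PySem.Int.mod (PySem.List.pyGetD xs i 0) 2 = 0 then
        match pvInnerA xs (i + 1) j with
        | some s =>
            pvOuterGo
              (PySem.List.pySetD (PySem.List.pySetD xs i (PySem.List.pyGetD xs s 0)) s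
                (PySem.List.pyGetD xs i 0))
              n (s + 1) j
        | none => pvOuterGo xs n (i + 1) j
      else pvOuterGo xs n (i + 1) j
    else xs

def swap_consecutive_pair_of_even_numbers (nums : List Int) : List Int :=
  pvOuterGo nums (nums.length + 1) 0 ((nums.length : Int) - 1)

-- ===== PORT B =====
-- for t in range(0, len(evens)-1, 2): swap nums[evens[t]], nums[evens[t+1]]  — consume two indices at a time
def pvPairsLoopB (nums : List Int) (evens : List Int) : List Int :=
  match evens with
  | a :: b :: rest =>
      pvPairsLoopB
        (PySem.List.pySetD (PySem.List.pySetD nums a (PySem.List.pyGetD nums b 0)) b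
          (PySem.List.pyGetD nums a 0))
        rest
  | _ => nums

def swap_consecutive_pair_of_even_numbers_alt (nums : List Int) : List Int :=
  pvPairsLoopB nums
    (((PySem.List.enumerate nums).filter (fun p => decide (PySem.Int.mod p.2 2 = 0))).map Prod.fst)

-- ===== PRECONDITION & SPEC =====
def Spec_swap_consecutive_pair_of_even_numbers (nums : List Int) (out : List Int) : Prop := out = swap_consecutive_pair_of_even_numbers_alt nums
instance (nums : List Int) (out : List Int) : Decidable (Spec_swap_consecutive_pair_of_even_numbers nums out) := by unfold Spec_swap_consecutive_pair_of_even_numbers; infer_instance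

-- ===== CLAIM (what is proved, stated in full; the proofs are below) =====
def Claim_equal_swap_consecutive_pair_of_even_numbers : Prop := ∀ (nums : List Int), Dom_swap_consecutive_pair_of_even_numbers nums → Spec_swap_consecutive_pair_of_even_numbers nums (swap_consecutive_pair_of_even_numbers nums)

-- ===== LEMMAS AND PROOFS =====

-- the indices (offset n) of the even elements of l
def pvEv (l : List Int) (n : Nat) : List Nat :=
  match l with
  | [] => []
  | v :: t => if PySem.Int.mod v 2 = 0 then n :: pvEv t (n + 1) else pvEv t (n + 1)

def pvIdx (k : Nat) : Int := (k : Int)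

theorem pvEv_cons_even (v : Int) (t : List Int) (n : Nat) (hv : PySem.Int.mod v 2 = 0) :
    pvEv (v :: t) n = n :: pvEv t (n + 1) := by
  simp only [pvEv, if_pos hv]

theorem pvEv_cons_odd (v : Int) (t : List Int) (n : Nat) (hv : ¬ PySem.Int.mod v 2 = 0) :
    pvEv (v :: t) n = pvEv t (n + 1) := by
  simp only [pvEv, if_neg hv]

theorem pvEv_mem (l : List Int) (n k : Nat) (h : k ∈ pvEv l n) : n ≤ k ∧ k < n + l.length := by
  induction l generalizing n with
  | nil => simp [pvEv] at h
  | cons v t ih =>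
    by_cases hv : PySem.Int.mod v 2 = 0
    · rw [pvEv_cons_even v t n hv] at h
      rcases List.mem_cons.mp h with rfl | h'
      · have hlen : (v :: t).length = t.length + 1 := rfl; omega
      · have := ih (n + 1) h'
        have hlen : (v :: t).length = t.length + 1 := rfl; omega
    · rw [pvEv_cons_odd v t n hv] at h
      have := ih (n + 1) h
      have hlen : (v :: t).length = t.length + 1 := rfl; omega

theorem pvEv_length (l : List Int) (n : Nat) : (pvEv l n).length ≤ l.length := by
  induction l generalizing n with
  | nil => simp [pvEv]
  | cons v t ih =>
    by_cases hv : PySem.Int.mod v 2 = 0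
    · rw [pvEv_cons_even v t n hv]; simpa using ih (n + 1)
    · rw [pvEv_cons_odd v t n hv]; have := ih (n + 1); simp; omega

theorem pvEv_head_mem (l : List Int) (n k : Nat) (h : (pvEv l n).head? = some k) :
    k ∈ pvEv l n := by
  cases hl : pvEv l n with
  | nil => rw [hl] at h; simp at h
  | cons a r =>
    rw [hl] at h
    simp only [List.head?_cons, Option.some.injEq] at h
    subst h
    simp

theorem pvEv_head (l : List Int) (n k : Nat) (h : (pvEv l n).head? = some k) :
    pvEv l n = k :: pvEv (l.drop (k + 1 - n)) (k + 1) := by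
  induction l generalizing n with
  | nil => simp [pvEv] at h
  | cons v t ih =>
    by_cases hv : PySem.Int.mod v 2 = 0
    · rw [pvEv_cons_even v t n hv] at h ⊢
      simp only [List.head?_cons, Option.some.injEq] at h
      subst h
      have hd : n + 1 - n = 1 := by omega
      rw [hd]
      rfl
    · rw [pvEv_cons_odd v t n hv] at h ⊢
      have hmem : k ∈ pvEv t (n + 1) := pvEv_head_mem t (n + 1) k h
      have hk := pvEv_mem t (n + 1) k hmem
      have h1 : k + 1 - n = (k - n) + 1 := by omega
      have h2 : k + 1 - (n + 1) = k - n := by omega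
      rw [ih (n + 1) h, h2, h1, List.drop_succ_cons]

theorem pv_drop_set_of_lt (xs : List Int) (m n : Nat) (v : Int) (h : m < n) :
    (xs.set m v).drop n = xs.drop n := by
  apply List.ext_getElem?
  intro k
  rw [List.getElem?_drop, List.getElem?_drop, List.getElem?_set_ne (by omega)]

theorem pvEv_step (xs : List Int) (i : Nat) (h : i < xs.length) :
    pvEv (xs.drop i) i =
      if PySem.Int.mod (xs.getD i 0) 2 = 0 then i :: pvEv (xs.drop (i + 1)) (i + 1)
      else pvEv (xs.drop (i + 1)) (i + 1) := by
  rw [List.drop_eq_getElem_cons h]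
  have hg : xs.getD i 0 = xs[i] := by
    rw [List.getD_eq_getElem?_getD, List.getElem?_eq_getElem h]; rfl
  rw [hg]
  by_cases hv : PySem.Int.mod xs[i] 2 = 0
  · rw [pvEv_cons_even _ _ _ hv, if_pos hv]
  · rw [pvEv_cons_odd _ _ _ hv, if_neg hv]

theorem pvEv_nil (xs : List Int) (i : Nat) (h : xs.length ≤ i) :
    pvEv (xs.drop i) i = [] := by
  rw [List.drop_eq_nil_iff.mpr (by omega)]; rfl

theorem pvEv_drop_head (xs : List Int) (i k : Nat)
    (h : (pvEv (xs.drop i) i).head? = some k) :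
    i ≤ k ∧ k < xs.length ∧ pvEv (xs.drop i) i = k :: pvEv (xs.drop (k + 1)) (k + 1) := by
  have hmem : k ∈ pvEv (xs.drop i) i := pvEv_head_mem (xs.drop i) i k h
  have hb := pvEv_mem (xs.drop i) i k hmem
  have hlen : (xs.drop i).length = xs.length - i := List.length_drop ..
  have hi : i < xs.length := by
    by_contra hc
    rw [pvEv_nil xs i (by omega)] at hmem
    simp at hmem
  refine ⟨by omega, by omega, ?_⟩
  have hthis := pvEv_head (xs.drop i) i k h
  rw [List.drop_drop] at hthis
  have he : i + (k + 1 - i) = k + 1 := by omega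
  rwa [he] at hthis

theorem pvInnerGo_eq (xs : List Int) :
    ∀ (fuel : Nat) (s : Int), 0 ≤ s → fuel = ((xs.length : Int) - s).toNat →
      pvInnerGo xs fuel s = (pvEv (xs.drop s.toNat) s.toNat).head?.map pvIdx := by
  intro fuel
  induction fuel with
  | zero =>
    intro s hs hf
    rw [pvEv_nil xs s.toNat (by omega)]
    rfl
  | succ n ih =>
    intro s hs hf
    have hlt : s.toNat < xs.length := by omega
    by_cases hcond : PySem.Int.mod (PySem.List.pyGetD xs s 0) 2 = 0
    · rw [PySem.List.pyGetD_of_nonneg xs 0 hs] at hcond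
      simp only [pvInnerGo]
      rw [if_pos (by rw [PySem.List.pyGetD_of_nonneg xs 0 hs]; exact hcond)]
      rw [pvEv_step xs s.toNat hlt, if_pos hcond]
      simp [pvIdx, Int.toNat_of_nonneg hs]
    · rw [PySem.List.pyGetD_of_nonneg xs 0 hs] at hcond
      simp only [pvInnerGo]
      rw [if_neg (by rw [PySem.List.pyGetD_of_nonneg xs 0 hs]; exact hcond)]
      have ht : (s + 1).toNat = s.toNat + 1 := by omega
      rw [ih (s + 1) (by omega) (by omega), ht, pvEv_step xs s.toNat hlt, if_neg hcond]

theorem pvInnerA_eq (xs : List Int) (s j : Int) :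
    0 ≤ s → j = (xs.length : Int) - 1 →
      pvInnerA xs s j = (pvEv (xs.drop s.toNat) s.toNat).head?.map pvIdx := by
  intro hs hj
  unfold pvInnerA
  exact pvInnerGo_eq xs ((j + 1 - s).toNat) s hs (by omega)

theorem pvPairsLoopB_short (xs : List Int) (l : List Int) (h : l.length ≤ 1) :
    pvPairsLoopB xs l = xs := by
  match l with
  | [] => rfl
  | [a] => rfl
  | a :: b :: r => simp at h

theorem pvOuterGo_eq :
    ∀ (fuel : Nat) (xs : List Int) (i j : Int), 0 ≤ i → j = (xs.length : Int) - 1 →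
      (j - i).toNat ≤ fuel →
      pvOuterGo xs fuel i j = pvPairsLoopB xs ((pvEv (xs.drop i.toNat) i.toNat).map pvIdx) := by
  intro fuel
  induction fuel with
  | zero =>
    intro xs i j hi hj hf
    have hlen : (xs.drop i.toNat).length = xs.length - i.toNat := List.length_drop ..
    have h1 := pvEv_length (xs.drop i.toNat) i.toNat
    rw [pvOuterGo, pvPairsLoopB_short _ _ (by rw [List.length_map]; omega)]
  | succ n ih =>
    intro xs i j hi hj hf
    by_cases hij : i < j
    · have hlt : i.toNat < xs.length := by omega
      simp only [pvOuterGo, if_pos hij]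
      by_cases hcond : PySem.Int.mod (xs.getD i.toNat 0) 2 = 0
      · rw [if_pos (by rw [PySem.List.pyGetD_of_nonneg xs 0 hi]; exact hcond)]
        -- decode the inner scan: the found index is the first even index after i
        have hinner := pvInnerA_eq xs (i + 1) j (by omega) hj
        have ht1 : (i + 1).toNat = i.toNat + 1 := by omega
        rw [ht1] at hinner
        cases hk : (pvEv (xs.drop (i.toNat + 1)) (i.toNat + 1)).head? with
        | none =>
          rw [hk] at hinner
          simp only [Option.map_none] at hinner
          rw [hinner]
          have hempty : pvEv (xs.drop (i.toNat + 1)) (i.toNat + 1) = [] :=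
            List.head?_eq_none_iff.mp hk
          rw [ih xs (i + 1) j (by omega) hj (by omega), ht1, hempty,
            pvEv_step xs i.toNat hlt, if_pos hcond, hempty]
          rw [pvPairsLoopB_short _ _ (by simp), pvPairsLoopB_short _ _ (by simp)]
        | some k =>
          rw [hk] at hinner
          simp only [Option.map_some, pvIdx] at hinner
          rw [hinner]
          obtain ⟨hik, hklen, hdec⟩ := pvEv_drop_head xs (i.toNat + 1) k hk
          -- rewrite the even-index list from position i
          rw [pvEv_step xs i.toNat hlt, if_pos hcond, hdec]
          -- B's side: one pairwise swap step
          simp only [List.map_cons, pvPairsLoopB]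
          have hiq : pvIdx i.toNat = i := Int.toNat_of_nonneg hi
          have hkq : pvIdx k = (k : Int) := rfl
          rw [hiq, hkq]
          -- the swapped lists coincide; apply the IH on the rest
          have ht2 : ((k : Int) + 1).toNat = k + 1 := by omega
          have hlen2 :
              (PySem.List.pySetD (PySem.List.pySetD xs i (PySem.List.pyGetD xs (k : Int) 0))
                  (k : Int) (PySem.List.pyGetD xs i 0)).length = xs.length := by
            simp [PySem.List.length_pySetD]
          have hdrop :
              (PySem.List.pySetD (PySem.List.pySetD xs i (PySem.List.pyGetD xs (k : Int) 0))
                  (k : Int) (PySem.List.pyGetD xs i 0)).drop (k + 1) = xs.drop (k + 1) := by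
            rw [PySem.List.pySetD_of_nonneg _ _ (by omega : (0:Int) ≤ (k : Int)),
              PySem.List.pySetD_of_nonneg _ _ hi]
            have hkk : ((k : Int)).toNat = k := by omega
            rw [hkk, pv_drop_set_of_lt _ _ _ _ (by omega), pv_drop_set_of_lt _ _ _ _ (by omega)]
          rw [ih _ ((k : Int) + 1) j (by omega) (by rw [hlen2]; exact hj) (by omega), ht2, hdrop]
      · rw [if_neg (by rw [PySem.List.pyGetD_of_nonneg xs 0 hi]; exact hcond)]
        have ht1 : (i + 1).toNat = i.toNat + 1 := by omega
        rw [ih xs (i + 1) j (by omega) hj (by omega), ht1, pvEv_step xs i.toNat hlt,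
          if_neg hcond]
    · have hlen : (xs.drop i.toNat).length = xs.length - i.toNat := List.length_drop ..
      have h1 := pvEv_length (xs.drop i.toNat) i.toNat
      simp only [pvOuterGo, if_neg hij]
      rw [pvPairsLoopB_short _ _ (by rw [List.length_map]; omega)]

theorem pvEvensB_eq (xs : List Int) (n : Nat) :
    ((PySem.List.enumerate xs (n : Int)).filter (fun p => decide (PySem.Int.mod p.2 2 = 0))).map
        Prod.fst = (pvEv xs n).map pvIdx := by
  induction xs generalizing n with
  | nil => simp [PySem.List.enumerate_nil, pvEv]
  | cons v t ih =>
    rw [PySem.List.enumerate_cons, List.filter_cons]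
    have hc : ((n : Int) + 1) = ((n + 1 : Nat) : Int) := by push_cast; ring
    by_cases hv : PySem.Int.mod v 2 = 0
    · rw [if_pos (by simpa using hv), List.map_cons, hc, ih (n + 1),
        pvEv_cons_even v t n hv, List.map_cons]
      rfl
    · rw [if_neg (by simpa using hv), hc, ih (n + 1), pvEv_cons_odd v t n hv]

-- ===== VERDICT (by name: the statement is the Claim_ definition above) =====
theorem swap_consecutive_pair_of_even_numbers_spec : Claim_equal_swap_consecutive_pair_of_even_numbers := by
  intro nums _
  unfold Spec_swap_consecutive_pair_of_even_numbers
  unfold swap_consecutive_pair_of_even_numbers swap_consecutive_pair_of_even_numbers_alt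
  rw [pvOuterGo_eq (nums.length + 1) nums 0 ((nums.length : Int) - 1) le_rfl rfl (by omega)]
  have h0 : ((0 : Int)).toNat = 0 := rfl
  rw [h0, List.drop_zero]
  have hev := pvEvensB_eq nums 0
  simp only [Nat.cast_zero] at hev
  rw [hev]
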